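-- pv_equiv track=rewrite | github.com/HunterLaugh/codewars_kata_python | 4 kyu Simplifying multilinear polynomials.py | splitPoly
-- ===== SOURCE A (Python) =====
-- def splitPoly(poly):
-- 	# split poly with '+-' and sort()
-- 	split=[]
-- 	temp=[]
-- 	for each in poly:
-- 		if (each in '+-') and temp:
-- 			temp.sort()
-- 			split.append(''.join(temp))
-- 			temp=[each]
-- 		else:
-- 			temp.append(each)
--
-- 	temp.sort()
-- 	split.append(''.join(temp))
--
-- 	if split[0][0] not in '+-':
-- 		split[0]='+'+split[0]
--
-- 	return split
-- ===== SOURCE B (Python) =====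
-- def splitPoly(poly):
--     # Recursive split-then-sort decomposition: find the next sign at index >= 1,
--     # emit the sorted prefix as a token, recurse on the rest.
--     def go(s):
--         for i in range(1, len(s)):
--             if s[i] in '+-':
--                 return [''.join(sorted(s[:i]))] + go(s[i:])
--         return [''.join(sorted(s))]
--     tokens = go(poly)
--     if tokens[0][0] not in '+-':
--         tokens[0] = '+' + tokens[0]
--     return tokens
-- ===== Notes on version B (the rewrite author's own statement) =====
-- stated objective: alternative
-- what changed: Replaces A's single stateful accumulator loop (split/temp lists mutated per character) with a recursive decomposition that finds the next sign boundary, emits the sorted prefix token and recurses on the remainder.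
import Mathlib
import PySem

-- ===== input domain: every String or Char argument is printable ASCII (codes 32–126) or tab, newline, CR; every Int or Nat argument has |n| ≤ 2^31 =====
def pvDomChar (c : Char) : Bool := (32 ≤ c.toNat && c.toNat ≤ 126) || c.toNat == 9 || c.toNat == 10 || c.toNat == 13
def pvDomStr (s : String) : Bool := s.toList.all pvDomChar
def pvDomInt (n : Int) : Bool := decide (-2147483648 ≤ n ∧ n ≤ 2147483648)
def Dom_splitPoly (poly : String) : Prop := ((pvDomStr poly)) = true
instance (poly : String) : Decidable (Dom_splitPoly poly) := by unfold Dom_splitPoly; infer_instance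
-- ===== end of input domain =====

-- B replaces A's stateful accumulator loop with a recursive sign-boundary split; same cost (objective: alternative).

-- ===== PORT A =====
-- one step of A's for-loop over the characters; state = (split, temp)
def pvStepA (st : List (List Char) × List Char) (c : Char) : List (List Char) × List Char :=
  if (c = '+' ∨ c = '-') ∧ st.2 ≠ [] then
    (st.1 ++ [PySem.List.sorted st.2 (fun x => x) false], [c])
  else
    (st.1, st.2 ++ [c])

def splitPoly (poly : String) : List String :=
  let st := poly.toList.foldl pvStepA ([], [])
  let split := st.1 ++ [PySem.List.sorted st.2 (fun x => x) false]
  match split with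
  | [] => []                       -- unreachable (split ends with an append)
  | t :: rest =>
    match t with
    | [] => []                     -- Python raises IndexError here (split[0][0]); outside Pre_
    | c :: _ =>
      (if c = '+' ∨ c = '-' then t :: rest else ('+' :: t) :: rest).map String.ofList

-- ===== PORT B =====
-- scan for the first sign character: returns (prefix before it, remainder starting at it)
def pvSpan (l : List Char) : List Char × List Char :=
  match l with
  | [] => ([], [])
  | c :: t =>
    if c = '+' ∨ c = '-' then ([], c :: t)
    else
      let pr := pvSpan t
      (c :: pr.1, pr.2)

theorem pvSpan_snd_length (l : List Char) : (pvSpan l).2.length ≤ l.length := by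
  induction l with
  | nil => simp [pvSpan]
  | cons c t ih =>
    simp only [pvSpan]
    split
    · simp
    · simpa using Nat.le_succ_of_le ih

-- the recursive `go` of Source B: first char never starts a split
def pvGoB (s : List Char) : List (List Char) :=
  match s with
  | [] => [[]]
  | c :: rest =>
    if (pvSpan rest).2 = [] then [PySem.List.sorted (c :: rest) (fun x => x) false]
    else PySem.List.sorted (c :: (pvSpan rest).1) (fun x => x) false :: pvGoB (pvSpan rest).2
termination_by s.length
decreasing_by
  have := pvSpan_snd_length rest
  simp only [List.length_cons]
  omega

def splitPoly_alt (poly : String) : List String :=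
  let tokens := pvGoB poly.toList
  match tokens with
  | [] => []                       -- unreachable (pvGoB never returns [])
  | t :: rest =>
    match t with
    | [] => []                     -- Python raises IndexError here (tokens[0][0]); outside Pre_
    | c :: _ =>
      (if c = '+' ∨ c = '-' then t :: rest else ('+' :: t) :: rest).map String.ofList

-- ===== PRECONDITION & SPEC =====
-- Pre_ excludes only the empty string, on which A (and B) raise IndexError at split[0][0].
def Pre_splitPoly (poly : String) : Prop := poly ≠ ""
instance (poly : String) : Decidable (Pre_splitPoly poly) := by unfold Pre_splitPoly; infer_instance
def pvWitness_splitPoly : String := "-a+b"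

def Spec_splitPoly (poly : String) (out : List String) : Prop := out = splitPoly_alt poly
instance (poly : String) (out : List String) : Decidable (Spec_splitPoly poly out) := by unfold Spec_splitPoly; infer_instance

-- ===== CLAIM (what is proved, stated in full; the proofs are below) =====
def Claim_equal_splitPoly : Prop := ∀ (poly : String), Dom_splitPoly poly → Pre_splitPoly poly → Spec_splitPoly poly (splitPoly poly)

-- ===== LEMMAS AND PROOFS =====

-- B's tokens for a partial current token `temp` followed by remaining input `l`
def pvGoTemp (temp l : List Char) : List (List Char) :=
  if (pvSpan l).2 = [] then [PySem.List.sorted (temp ++ l) (fun x => x) false]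
  else PySem.List.sorted (temp ++ (pvSpan l).1) (fun x => x) false :: pvGoB (pvSpan l).2

theorem pvGoB_cons (c : Char) (rest : List Char) :
    pvGoB (c :: rest) = pvGoTemp [c] rest := by
  rw [pvGoB.eq_def, pvGoTemp]
  simp

-- main loop invariant: A's fold from (split, temp) with temp ≠ [] produces split ++ B's tokens
theorem pvMain (l : List Char) : ∀ (split : List (List Char)) (temp : List Char), temp ≠ [] →
    (let st := l.foldl pvStepA (split, temp)
     st.1 ++ [PySem.List.sorted st.2 (fun x => x) false]) = split ++ pvGoTemp temp l := by
  match l with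
  | [] =>
    intro split temp _
    simp [pvGoTemp, pvSpan]
  | c :: t =>
    intro split temp htemp
    by_cases hc : c = '+' ∨ c = '-'
    · -- sign: A closes the token; B's span stops immediately
      have hstep : pvStepA (split, temp) c
          = (split ++ [PySem.List.sorted temp (fun x => x) false], [c]) := by
        simp [pvStepA, hc, htemp]
      have := pvMain t (split ++ [PySem.List.sorted temp (fun x => x) false]) [c] (by simp)
      simp only [List.foldl_cons, hstep] at *
      rw [this]
      have hspan : pvSpan (c :: t) = ([], c :: t) := by simp [pvSpan, hc]
      conv_rhs => rw [pvGoTemp, hspan]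
      simp [pvGoB_cons, pvGoTemp]
    · -- ordinary char: A appends to temp; B's span absorbs c into the prefix
      have hstep : pvStepA (split, temp) c = (split, temp ++ [c]) := by
        simp [pvStepA, hc]
      have := pvMain t split (temp ++ [c]) (by simp)
      simp only [List.foldl_cons, hstep] at *
      rw [this]
      have hspan : pvSpan (c :: t) = (c :: (pvSpan t).1, (pvSpan t).2) := by
        simp [pvSpan, hc]
      congr 1
      rw [pvGoTemp, pvGoTemp, hspan]
      by_cases h : (pvSpan t).2 = []
      · simp [h]
      · simp [h]
termination_by l.length

-- ===== VERDICT (by name: the statement is the Claim_ definition above) =====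
theorem splitPoly_spec : Claim_equal_splitPoly := by
  intro poly _ hpre
  unfold Spec_splitPoly splitPoly splitPoly_alt
  cases hl : poly.toList with
  | nil =>
    exact absurd (by simpa using congrArg String.ofList hl) hpre
  | cons c t =>
    have hfirst : pvStepA (([], []) : List (List Char) × List Char) c = ([], [c]) := by
      simp [pvStepA]
    have := pvMain t [] [c] (by simp)
    simp only [List.foldl_cons, hfirst, pvGoB_cons]
    simp only at this
    rw [this]
    simp
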